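-- pv_equiv track=rewrite | github.com/abhineetjain13/Crawlwise | backend/app/services/adapters/shopify.py | _variant_axes
-- ===== SOURCE A (Python) =====
-- def _variant_axes(variants: list[dict]) -> dict[str, list[str]]:
--     axes: dict[str, list[str]] = {}
--     for variant in variants:
--         if not isinstance(variant, dict):
--             continue
--         option_values = variant.get("option_values")
--         if not isinstance(option_values, dict):
--             continue
--         for axis_name, value in option_values.items():
--             cleaned = str(value or "").strip()
--             if not cleaned:
--                 continue
--             axes.setdefault(str(axis_name), [])
--             if cleaned not in axes[str(axis_name)]:
--                 axes[str(axis_name)].append(cleaned)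
--     return axes
-- ===== SOURCE B (Python) =====
-- def _variant_axes(variants: list[dict]) -> dict[str, list[str]]:
--     # Two passes: collect all cleaned values (with duplicates) per axis, then
--     # dedup each axis list once with dict.fromkeys (first-occurrence order).
--     bucket: dict[str, list[str]] = {}
--     for variant in variants:
--         if not isinstance(variant, dict):
--             continue
--         option_values = variant.get("option_values")
--         if not isinstance(option_values, dict):
--             continue
--         for axis_name, value in option_values.items():
--             cleaned = str(value or "").strip()
--             if not cleaned:
--                 continue
--             bucket[str(axis_name)] = bucket.get(str(axis_name), []) + [cleaned]
--     return {axis: list(dict.fromkeys(values)) for axis, values in bucket.items()}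
-- ===== Notes on version B (the rewrite author's own statement) =====
-- stated objective: alternative
-- what changed: B replaces A's per-item membership-test-then-append dedup with two passes: one pass appends every cleaned value (duplicates kept) into a bucket dict, a second pass collapses each axis list with dict.fromkeys first-occurrence dedup.
import Mathlib
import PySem

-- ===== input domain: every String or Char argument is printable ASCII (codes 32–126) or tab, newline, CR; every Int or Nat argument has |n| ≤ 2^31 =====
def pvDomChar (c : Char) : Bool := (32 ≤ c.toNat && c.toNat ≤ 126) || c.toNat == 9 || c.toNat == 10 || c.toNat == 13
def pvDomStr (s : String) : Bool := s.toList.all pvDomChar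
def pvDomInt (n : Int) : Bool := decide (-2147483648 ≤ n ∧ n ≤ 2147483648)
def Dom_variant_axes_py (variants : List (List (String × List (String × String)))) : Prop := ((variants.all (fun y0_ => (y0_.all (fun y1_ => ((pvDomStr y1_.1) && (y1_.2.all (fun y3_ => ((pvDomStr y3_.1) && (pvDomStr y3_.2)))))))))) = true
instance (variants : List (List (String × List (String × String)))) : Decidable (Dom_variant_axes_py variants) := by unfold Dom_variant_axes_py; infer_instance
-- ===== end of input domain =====

-- B collects every cleaned value per axis in one pass (duplicates kept) and
-- deduplicates each axis list in a single second pass; same return value as A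
-- (objective: alternative decomposition, no speed claim).

-- ===== PORT A =====
-- cleaned = str(value or "").strip()  (shared by both ports: it is the same Python line)
def vaClean (p : String × String) : String := PySem.Str.strip (if p.2 == "" then "" else p.2)

-- the two closing lines of A's loop body: if cleaned not in axes[k]: axes[k].append(cleaned)
def vaAppend (d1 : PySem.Dict String (List String)) (k c : String) :
    PySem.Dict String (List String) :=
  if (d1.getD k []).contains c then d1
  else d1.insert k (d1.getD k [] ++ [c])

-- one option_values entry: clean the value, skip empty, dedup-append into axes
def vaStepA (d : PySem.Dict String (List String)) (p : String × String) :
    PySem.Dict String (List String) :=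
  if vaClean p == "" then d
  else vaAppend (d.setdefault p.1 []) p.1 (vaClean p)             -- axes.setdefault(str(axis_name), []); …

-- one variant: fetch "option_values" (None → skip), loop over its items
def vaVariantA (d : PySem.Dict String (List String))
    (variant : List (String × List (String × String))) : PySem.Dict String (List String) :=
  match (PySem.Dict.mk variant).get? "option_values" with
  | none => d
  | some ov => ov.foldl vaStepA d

def variant_axes_py (variants : List (List (String × List (String × String)))) :
    List (String × List String) :=
  (variants.foldl vaVariantA PySem.Dict.empty).items

-- ===== PORT B =====
-- pass 1 step: the same cleaning/skip, but append unconditionally into bucket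
def vbStep (d : PySem.Dict String (List String)) (p : String × String) :
    PySem.Dict String (List String) :=
  if vaClean p == "" then d
  else d.insert p.1 (d.getD p.1 [] ++ [vaClean p])                  -- bucket[k] = bucket.get(k, []) + [cleaned]

def vbVariant (d : PySem.Dict String (List String))
    (variant : List (String × List (String × String))) : PySem.Dict String (List String) :=
  match (PySem.Dict.mk variant).get? "option_values" with
  | none => d
  | some ov => ov.foldl vbStep d

-- list(dict.fromkeys(values)): first-occurrence-order dedup
def vbDedup (l : List String) : List String :=
  l.foldl (fun acc x => if acc.contains x then acc else acc ++ [x]) []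

-- final dict comprehension over bucket's (unique) keys: its items are the mapped pairs
def variant_axes_py_alt (variants : List (List (String × List (String × String)))) :
    List (String × List String) :=
  ((variants.foldl vbVariant PySem.Dict.empty).items).map (fun p => (p.1, vbDedup p.2))

-- ===== PRECONDITION & SPEC =====
def Spec_variant_axes_py (variants : List (List (String × List (String × String)))) (out : List (String × List String)) : Prop := out = variant_axes_py_alt variants
instance (variants : List (List (String × List (String × String)))) (out : List (String × List String)) : Decidable (Spec_variant_axes_py variants out) := by unfold Spec_variant_axes_py; infer_instance

-- ===== CLAIM (what is proved, stated in full; the proofs are below) =====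
def Claim_equal_variant_axes_py : Prop := ∀ (variants : List (List (String × List (String × String)))), Dom_variant_axes_py variants → Spec_variant_axes_py variants (variant_axes_py variants)

-- ===== LEMMAS AND PROOFS =====

-- value-map of a dict (B's final pass, as a Dict operation)
def mapD (d : PySem.Dict String (List String)) : PySem.Dict String (List String) :=
  PySem.Dict.mk (d.items.map (fun p => (p.1, vbDedup p.2)))

theorem items_mapD (d : PySem.Dict String (List String)) :
    (mapD d).items = d.items.map (fun p => (p.1, vbDedup p.2)) := rfl

theorem keys_mapD (d : PySem.Dict String (List String)) : (mapD d).keys = d.keys := by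
  simp only [PySem.Dict.keys, items_mapD, List.map_map]
  rfl

theorem get?_mapD (d : PySem.Dict String (List String)) (k : String) :
    (mapD d).get? k = (d.get? k).map vbDedup := by
  obtain ⟨l⟩ := d
  induction l with
  | nil => rfl
  | cons q rest ih =>
      obtain ⟨a, v⟩ := q
      show (PySem.Dict.mk ((a, vbDedup v) :: rest.map _)).get? k = _
      rw [PySem.Dict.get?_mk_cons, PySem.Dict.get?_mk_cons]
      by_cases h : (a == k) = true
      · rw [if_pos h, if_pos h]; rfl
      · rw [if_neg h, if_neg h]; exact ih

theorem contains_mapD (d : PySem.Dict String (List String)) (k : String) :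
    (mapD d).contains k = d.contains k := by
  rw [PySem.Dict.contains_eq_isSome_get?, PySem.Dict.contains_eq_isSome_get?, get?_mapD]
  cases d.get? k <;> rfl

theorem mapD_insert (d : PySem.Dict String (List String)) (k : String) (v : List String) :
    mapD (d.insert k v) = (mapD d).insert k (vbDedup v) := by
  apply PySem.Dict.ext
  rw [items_mapD, PySem.Dict.items_insert, PySem.Dict.items_insert, contains_mapD, items_mapD]
  by_cases h : d.contains k = true
  · rw [if_pos h, if_pos h, List.map_map, List.map_map]
    apply List.map_congr_left
    intro p _
    by_cases hp : (p.1 == k) = true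
    · simp only [Function.comp_apply, hp, if_pos]
    · simp only [Function.comp_apply, hp, Bool.false_eq_true, if_false]
  · rw [if_neg h, if_neg h, List.map_append]
    rfl

theorem insert_self_of_get? (d : PySem.Dict String (List String)) (k : String) (v : List String)
    (hnd : d.keys.Nodup) (h : d.get? k = some v) : d.insert k v = d := by
  have hc : d.contains k = true := by
    rw [PySem.Dict.contains_eq_isSome_get?, h]; rfl
  apply PySem.Dict.ext
  rw [PySem.Dict.items_insert, if_pos hc]
  have : ∀ p ∈ d.items, (if (p.1 == k) = true then (k, v) else p) = p := by
    intro p hp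
    by_cases hk : (p.1 == k) = true
    · rw [if_pos hk]
      have hek : p.1 = k := by exact eq_of_beq hk
      have : d.get? p.1 = some p.2 := PySem.Dict.get?_of_mem_items d (by exact hp) hnd
      rw [hek, h] at this
      obtain ⟨p1, p2⟩ := p
      simp only at hek this ⊢
      rw [hek, Option.some_inj.mp this]
    · rw [if_neg hk]
  rw [List.map_congr_left this]
  exact List.map_id' d.items

theorem vbDedup_snoc (l : List String) (x : String) :
    vbDedup (l ++ [x]) = if (vbDedup l).contains x then vbDedup l else vbDedup l ++ [x] := by
  simp [vbDedup, List.foldl_append]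

theorem step_comm (d : PySem.Dict String (List String)) (p : String × String)
    (hnd : d.keys.Nodup) : vaStepA (mapD d) p = mapD (vbStep d p) := by
  unfold vaStepA vbStep
  by_cases hc : (vaClean p == "") = true
  · rw [if_pos hc, if_pos hc]
  · rw [if_neg hc, if_neg hc, mapD_insert]
    by_cases hk : d.contains p.1 = true
    · obtain ⟨l, hl⟩ : ∃ l, d.get? p.1 = some l := by
        rw [PySem.Dict.contains_eq_isSome_get?] at hk
        cases hgl : d.get? p.1 with
        | none => rw [hgl] at hk; simp at hk
        | some l => exact ⟨l, rfl⟩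
      have hk' : (mapD d).contains p.1 = true := by rw [contains_mapD]; exact hk
      rw [PySem.Dict.setdefault_of_contains _ _ hk']
      have hgd : d.getD p.1 [] = l := by rw [PySem.Dict.getD_eq_get?_getD, hl]; rfl
      have hgm : (mapD d).getD p.1 [] = vbDedup l := by
        rw [PySem.Dict.getD_eq_get?_getD, get?_mapD, hl]; rfl
      unfold vaAppend
      rw [hgd, hgm, vbDedup_snoc]
      by_cases hin : (vbDedup l).contains (vaClean p) = true
      · rw [if_pos hin, if_pos hin]
        have : (mapD d).get? p.1 = some (vbDedup l) := by rw [get?_mapD, hl]; rfl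
        exact (insert_self_of_get? (mapD d) p.1 (vbDedup l) (by rw [keys_mapD]; exact hnd) this).symm
      · rw [if_neg hin, if_neg hin]
    · have hk' : (mapD d).contains p.1 = false := by rw [contains_mapD]; exact eq_false_of_ne_true hk
      rw [PySem.Dict.setdefault_of_not_contains _ _ hk']
      have hgd : d.getD p.1 [] = [] := PySem.Dict.getD_of_not_contains _ _ (eq_false_of_ne_true hk)
      unfold vaAppend
      rw [PySem.Dict.getD_insert_self, hgd]
      show ((mapD d).insert p.1 []).insert p.1 ([] ++ [vaClean p]) = _
      rw [PySem.Dict.insert_insert_self]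
      rfl

theorem nodup_vbStep (d : PySem.Dict String (List String)) (p : String × String)
    (hnd : d.keys.Nodup) : (vbStep d p).keys.Nodup := by
  unfold vbStep
  by_cases h : (vaClean p == "") = true
  · rw [if_pos h]; exact hnd
  · rw [if_neg h]; exact PySem.Dict.nodup_keys_insert _ _ _ hnd

theorem inner_comm (l : List (String × String)) (d : PySem.Dict String (List String))
    (hnd : d.keys.Nodup) : l.foldl vaStepA (mapD d) = mapD (l.foldl vbStep d) := by
  induction l generalizing d with
  | nil => rfl
  | cons p l ih =>
      simp only [List.foldl_cons]
      rw [step_comm d p hnd]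
      exact ih _ (nodup_vbStep d p hnd)

theorem nodup_inner (l : List (String × String)) (d : PySem.Dict String (List String))
    (hnd : d.keys.Nodup) : (l.foldl vbStep d).keys.Nodup := by
  induction l generalizing d with
  | nil => exact hnd
  | cons p l ih => exact ih _ (nodup_vbStep d p hnd)

theorem variant_comm (v : List (String × List (String × String)))
    (d : PySem.Dict String (List String)) (hnd : d.keys.Nodup) :
    vaVariantA (mapD d) v = mapD (vbVariant d v) := by
  unfold vaVariantA vbVariant
  cases (PySem.Dict.mk v).get? "option_values" with
  | none => rfl
  | some ov => exact inner_comm ov d hnd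

theorem nodup_vbVariant (v : List (String × List (String × String)))
    (d : PySem.Dict String (List String)) (hnd : d.keys.Nodup) :
    (vbVariant d v).keys.Nodup := by
  unfold vbVariant
  cases (PySem.Dict.mk v).get? "option_values" with
  | none => exact hnd
  | some ov => exact nodup_inner ov d hnd

theorem outer_comm (vs : List (List (String × List (String × String))))
    (d : PySem.Dict String (List String)) (hnd : d.keys.Nodup) :
    vs.foldl vaVariantA (mapD d) = mapD (vs.foldl vbVariant d) := by
  induction vs generalizing d with
  | nil => rfl
  | cons v vs ih =>
      simp only [List.foldl_cons]
      rw [variant_comm v d hnd]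
      exact ih _ (nodup_vbVariant v d hnd)

-- ===== VERDICT (by name: the statement is the Claim_ definition above) =====
theorem variant_axes_py_spec : Claim_equal_variant_axes_py := by
  intro variants _
  unfold Spec_variant_axes_py variant_axes_py variant_axes_py_alt
  have h0 : (PySem.Dict.empty : PySem.Dict String (List String)) = mapD PySem.Dict.empty := rfl
  rw [h0, outer_comm variants PySem.Dict.empty (by simp [PySem.Dict.empty, PySem.Dict.keys])]
  exact items_mapD _
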